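-- pv_equiv track=rewrite | github.com/esserevero/POI-Recall-Rag | src/data_loader.py | clean_subtitle_text
-- ===== SOURCE A (Python) =====
-- def clean_subtitle_text(text: str) -> str:
--     """
--     清洗字幕文本
--     只做非语义的清理：压缩多余空行、去除尾随空格
--     不修改文本内容本身
--
--     Args:
--         text: 原始字幕文本
--
--     Returns:
--         清洗后的文本
--     """
--     # 去除每行尾随空格
--     lines = [line.rstrip() for line in text.split('\n')]
--
--     # 压缩连续空行为单个空行
--     cleaned_lines = []
--     prev_empty = False
--
--     for line in lines:
--         is_empty = len(line.strip()) == 0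
--
--         if is_empty:
--             if not prev_empty:
--                 cleaned_lines.append('')
--             prev_empty = True
--         else:
--             cleaned_lines.append(line)
--             prev_empty = False
--
--     return '\n'.join(cleaned_lines)
-- ===== SOURCE B (Python) =====
-- def clean_subtitle_text(text: str) -> str:
--     """Paragraph-based cleaning: extract the maximal runs of nonblank lines as
--     paragraphs and rebuild the text by joining them with blank separators,
--     restoring a single leading/trailing blank line if the text had any."""
--     lines = [line.rstrip() for line in text.split('\n')]
--     paragraphs = _paragraphs(lines)
--     if not paragraphs:
--         return ''
--     out = '\n\n'.join(paragraphs)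
--     if not lines[0]:
--         out = '\n' + out
--     if not lines[-1]:
--         out = out + '\n'
--     return out
--
--
-- def _paragraphs(lines):
--     """Maximal runs of nonblank lines, each run joined with newlines."""
--     if not lines:
--         return []
--     if not lines[0]:
--         return _paragraphs(lines[1:])
--     k = 1
--     while k < len(lines) and lines[k]:
--         k += 1
--     return ['\n'.join(lines[:k])] + _paragraphs(lines[k:])
-- ===== Notes on version B (the rewrite author's own statement) =====
-- stated objective: alternative
-- what changed: Instead of A's single stateful pass with a prev_empty flag emitting cleaned lines one by one, B recursively extracts the maximal runs of nonblank lines as paragraphs and reconstructs the text by joining the paragraphs with blank-line separators, re-adding one leading/trailing newline when the text began/ended with blank lines.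
import Mathlib
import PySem

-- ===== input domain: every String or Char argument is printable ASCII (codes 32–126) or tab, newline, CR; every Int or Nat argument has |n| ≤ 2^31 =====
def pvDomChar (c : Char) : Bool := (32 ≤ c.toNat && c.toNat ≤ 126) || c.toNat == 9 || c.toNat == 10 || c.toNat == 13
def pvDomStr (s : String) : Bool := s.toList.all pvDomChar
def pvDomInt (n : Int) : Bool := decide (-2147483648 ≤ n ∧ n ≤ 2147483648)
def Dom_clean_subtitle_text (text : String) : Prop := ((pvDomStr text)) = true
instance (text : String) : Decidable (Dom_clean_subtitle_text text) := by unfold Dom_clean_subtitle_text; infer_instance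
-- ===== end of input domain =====

-- B rebuilds the text from its maximal nonblank-line runs (paragraphs) joined by blank
-- separators, instead of A's stateful prev_empty line-by-line pass; objective: alternative.

-- ===== PORT A =====
def clean_subtitle_text (text : String) : String :=
  let lines := (PySem.Chars.splitOn text.toList ['\n']).map PySem.Chars.rstrip
  let r := lines.foldl (fun (st : List (List Char) × Bool) line =>
      if (PySem.Chars.strip line).length = 0 then
        (if st.2 then st.1 else st.1 ++ [([] : List Char)], true)
      else (st.1 ++ [line], false))
    ([], false)
  String.ofList (PySem.Chars.join ['\n'] r.1)

-- ===== PORT B =====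
-- the Python `k`-counting while loop computes exactly the length of the maximal
-- nonblank prefix, so `lines[:k]` / `lines[k:]` are takeWhile / dropWhile
def pvParagraphs : List (List Char) → List (List Char)
  | [] => []
  | l :: ls =>
    if l.isEmpty then pvParagraphs ls
    else
      PySem.Chars.join ['\n'] (l :: ls.takeWhile (fun x => !x.isEmpty)) ::
        pvParagraphs (ls.dropWhile (fun x => !x.isEmpty))
  termination_by ls => ls.length
  decreasing_by
    · simp
    · have := List.length_dropWhile_le (fun x => !x.isEmpty) ls
      simp; omega

def clean_subtitle_text_alt (text : String) : String :=
  let lines := (PySem.Chars.splitOn text.toList ['\n']).map PySem.Chars.rstrip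
  let paragraphs := pvParagraphs lines
  if paragraphs = [] then ""
  else
    let out := PySem.Chars.join ['\n', '\n'] paragraphs
    let out := if lines.head? = some [] then '\n' :: out else out
    let out := if lines.getLast? = some [] then out ++ ['\n'] else out
    String.ofList out

-- ===== PRECONDITION & SPEC =====
def Spec_clean_subtitle_text (text : String) (out : String) : Prop := out = clean_subtitle_text_alt text
instance (text : String) (out : String) : Decidable (Spec_clean_subtitle_text text out) := by unfold Spec_clean_subtitle_text; infer_instance

-- ===== CLAIM =====
def Claim_equal_clean_subtitle_text : Prop := ∀ (text : String), Dom_clean_subtitle_text text → Spec_clean_subtitle_text text (clean_subtitle_text text)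

-- ===== LEMMAS AND PROOFS =====

-- proof-side recursive form of A's stateful loop
def pvAClean : List (List Char) → Bool → List (List Char)
  | [], _ => []
  | l :: ls, prev =>
    if l.isEmpty then (if prev then pvAClean ls true else [] :: pvAClean ls true)
    else l :: pvAClean ls false

-- a line whose strip is empty is all whitespace
theorem all_isspace_of_strip_nil (y : List Char) (h : PySem.Chars.strip y = []) :
    ∀ c ∈ y, PySem.Chars.isspace c = true := by
  intro c hc
  have h2 : List.dropWhile PySem.Chars.isspace (PySem.Chars.lstrip y).reverse = [] := by
    simpa [PySem.Chars.strip, PySem.Chars.rstrip] using h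
  have hdrop : ∀ x ∈ List.dropWhile PySem.Chars.isspace y, PySem.Chars.isspace x = true := by
    intro x hx
    exact (List.dropWhile_eq_nil_iff.mp h2) x (by simpa [PySem.Chars.lstrip] using hx)
  rcases List.mem_append.mp
      (by simpa [List.takeWhile_append_dropWhile] using hc :
        c ∈ List.takeWhile PySem.Chars.isspace y ++ List.dropWhile PySem.Chars.isspace y) with h1 | h1
  · exact List.mem_takeWhile_imp h1
  · exact hdrop c h1

-- an all-whitespace line rstrips to []
theorem rstrip_nil_of_all_isspace (y : List Char) (h : ∀ c ∈ y, PySem.Chars.isspace c = true) :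
    PySem.Chars.rstrip y = [] := by
  simp only [PySem.Chars.rstrip, List.reverse_eq_nil_iff, List.dropWhile_eq_nil_iff]
  intro x hx
  exact h x (List.mem_reverse.mp hx)

-- rstrip is idempotent
theorem rstrip_idem (x : List Char) :
    PySem.Chars.rstrip (PySem.Chars.rstrip x) = PySem.Chars.rstrip x := by
  simp only [PySem.Chars.rstrip, List.reverse_reverse]
  congr 1
  rw [List.dropWhile_eq_self_iff]
  intro hl
  exact by simpa using List.dropWhile_get_zero_not (p := PySem.Chars.isspace) x.reverse hl

theorem rstripped_nil_of_strip_len_zero (x : List Char)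
    (h : (PySem.Chars.strip (PySem.Chars.rstrip x)).length = 0) :
    PySem.Chars.rstrip x = [] := by
  have h0 : PySem.Chars.strip (PySem.Chars.rstrip x) = [] := List.length_eq_zero_iff.mp h
  have h1 := rstrip_nil_of_all_isspace _ (all_isspace_of_strip_nil _ h0)
  rwa [rstrip_idem] at h1

-- A's foldl equals the recursive pvAClean, for lists of rstripped lines
theorem foldA_eq (ls : List (List Char))
    (hls : ∀ l ∈ ls, (PySem.Chars.strip l).length = 0 → l = [])
    (acc : List (List Char)) (prev : Bool) :
    (ls.foldl (fun (st : List (List Char) × Bool) line =>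
        if (PySem.Chars.strip line).length = 0 then
          (if st.2 then st.1 else st.1 ++ [([] : List Char)], true)
        else (st.1 ++ [line], false))
      (acc, prev)).1 = acc ++ pvAClean ls prev := by
  induction ls generalizing acc prev with
  | nil => simp [pvAClean]
  | cons l ls ih =>
    have hl := hls l List.mem_cons_self
    have hls' : ∀ x ∈ ls, (PySem.Chars.strip x).length = 0 → x = [] :=
      fun x hx => hls x (List.mem_cons_of_mem _ hx)
    by_cases h : (PySem.Chars.strip l).length = 0
    · have hnil : l = [] := hl h
      subst hnil
      have hs : PySem.Chars.strip ([] : List Char) = [] := rfl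
      cases prev with
      | true => simpa [hs, pvAClean] using ih hls' acc true
      | false =>
        have h2 := ih hls' (acc ++ [[]]) true
        rw [List.append_assoc] at h2
        simpa [hs, pvAClean] using h2
    · have hne : l ≠ [] := by
        rintro rfl
        exact h (by simp [PySem.Chars.strip, PySem.Chars.rstrip, PySem.Chars.lstrip])
      have hie : l.isEmpty = false := by simpa [List.isEmpty_iff] using hne
      have hs : ¬ (PySem.Chars.strip l = []) := fun e => h (by simp [e])
      simpa [hs, pvAClean, hie] using ih hls' (acc ++ [l]) false

-- pvParagraphs skips leading blank lines
theorem paragraphs_dropWhile (ls : List (List Char)) :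
    pvParagraphs (ls.dropWhile (fun l => l.isEmpty)) = pvParagraphs ls := by
  induction ls with
  | nil => simp
  | cons l ls ih =>
    by_cases h : l.isEmpty
    · rw [List.dropWhile_cons_of_pos h, ih]
      rw [pvParagraphs]
      simp [h]
    · rw [List.dropWhile_cons_of_neg h]

-- all-blank lists have no paragraphs, and conversely
theorem paragraphs_nil_iff (ls : List (List Char)) :
    pvParagraphs ls = [] ↔ ∀ l ∈ ls, l = [] := by
  induction ls with
  | nil => simp [pvParagraphs]
  | cons l ls ih =>
    by_cases h : l.isEmpty
    · have hl : l = [] := by simpa [List.isEmpty_iff] using h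
      rw [pvParagraphs]
      simp [hl, ih]
    · rw [pvParagraphs]
      have hl : l ≠ [] := by simpa [List.isEmpty_iff] using h
      simp [h, hl]

-- skipping blanks with prev = true
theorem aclean_true (ls : List (List Char)) :
    pvAClean ls true = pvAClean (ls.dropWhile (fun l => l.isEmpty)) false := by
  induction ls with
  | nil => simp [pvAClean]
  | cons l ls ih =>
    by_cases h : l.isEmpty
    · rw [List.dropWhile_cons_of_pos h, ← ih]
      simp [pvAClean, h]
    · rw [List.dropWhile_cons_of_neg h]
      simp [pvAClean, h]

-- a nonblank prefix passes through A's loop unchanged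
theorem aclean_block (b rest : List (List Char)) (hb : ∀ l ∈ b, l ≠ []) :
    pvAClean (b ++ rest) false = b ++ pvAClean rest false := by
  induction b with
  | nil => simp
  | cons x b ih =>
    have hx : x.isEmpty = false := by
      simpa [List.isEmpty_iff] using hb x List.mem_cons_self
    simp [pvAClean, hx, ih (fun l hl => hb l (List.mem_cons_of_mem _ hl))]

-- pvAClean of a nonempty list with prev = false is nonempty
theorem aclean_ne_nil (l : List Char) (ls : List (List Char)) :
    pvAClean (l :: ls) false ≠ [] := by
  by_cases h : l.isEmpty <;> simp [pvAClean, h]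

-- all-blank lists are erased by A's loop when prev = true
theorem aclean_true_allblank (ls : List (List Char)) (h : ∀ l ∈ ls, l = []) :
    pvAClean ls true = [] := by
  induction ls with
  | nil => simp [pvAClean]
  | cons l ls ih =>
    have hl : l = [] := h l List.mem_cons_self
    subst hl
    simp [pvAClean, ih (fun x hx => h x (List.mem_cons_of_mem _ hx))]

-- join over an appended split with both halves nonempty
theorem join_append (sep : List Char) (xs ys : List (List Char)) (hx : xs ≠ []) (hy : ys ≠ []) :
    PySem.Chars.join sep (xs ++ ys) =
      PySem.Chars.join sep xs ++ sep ++ PySem.Chars.join sep ys := by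
  induction xs with
  | nil => exact absurd rfl hx
  | cons x xs ih =>
    cases xs with
    | nil =>
      cases ys with
      | nil => exact absurd rfl hy
      | cons y ys =>
        simp [PySem.Chars.join_cons_cons, PySem.Chars.join_singleton]
    | cons x2 xs2 =>
      rw [show x :: x2 :: xs2 ++ ys = x :: (x2 :: xs2 ++ ys) by simp,
        show x2 :: xs2 ++ ys = x2 :: (xs2 ++ ys) by simp, PySem.Chars.join_cons_cons,
        show x2 :: (xs2 ++ ys) = x2 :: xs2 ++ ys by simp, ih (by simp),
        PySem.Chars.join_cons_cons]
      simp

-- getLast? is preserved by dropping a prefix when the remainder is nonempty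
theorem getLast?_dropWhile (p : List Char → Bool) (ls : List (List Char))
    (h : ls.dropWhile p ≠ []) : (ls.dropWhile p).getLast? = ls.getLast? := by
  conv_rhs => rw [← List.takeWhile_append_dropWhile (p := p) (l := ls)]
  rw [List.getLast?_append_of_ne_nil _ h]

theorem paragraphs_ne_nil (h : List Char) (t : List (List Char)) (hh : h ≠ []) :
    pvParagraphs (h :: t) ≠ [] := by
  intro e
  exact hh ((paragraphs_nil_iff (h :: t)).mp e h List.mem_cons_self)

theorem getLast?_cons_ne {α : Type} (a : α) (l : List α) (h : l ≠ []) :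
    (a :: l).getLast? = l.getLast? := by
  cases l with
  | nil => exact absurd rfl h
  | cons b t => simp [List.getLast?_cons_cons]

theorem getLast?_allblank (l : List (List Char)) (hne : l ≠ []) (h : ∀ x ∈ l, x = []) :
    l.getLast? = some [] := by
  induction l with
  | nil => exact absurd rfl hne
  | cons a t ih =>
    cases t with
    | nil => simpa using h a List.mem_cons_self
    | cons b t' =>
      rw [List.getLast?_cons_cons]
      exact ih (by simp) (fun x hx => h x (List.mem_cons_of_mem _ hx))

theorem join_nil_cons (sep x : List Char) (xs : List (List Char)) :
    PySem.Chars.join sep ([] :: x :: xs) = sep ++ PySem.Chars.join sep (x :: xs) := by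
  simp [PySem.Chars.join_cons_cons]


theorem dropWhile_head_false {α : Type} (p : α → Bool) (ls : List α) (h2 : α) (t2 : List α)
    (h : ls.dropWhile p = h2 :: t2) : p h2 = false := by
  induction ls with
  | nil => simp at h
  | cons a t ihh =>
    by_cases hp : p a
    · rw [List.dropWhile_cons_of_pos hp] at h
      exact ihh h
    · rw [List.dropWhile_cons_of_neg hp] at h
      injection h with h1 _
      subst h1
      simpa using hp

-- one step of the main induction (IH is over the length bound)
theorem main_step (n : Nat)
    (ih : ∀ ls : List (List Char), ls.length ≤ n → pvParagraphs ls ≠ [] →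
      PySem.Chars.join ['\n'] (pvAClean ls false)
        = (if ls.head? = some [] then ['\n'] else [])
          ++ PySem.Chars.join ['\n', '\n'] (pvParagraphs ls)
          ++ (if ls.getLast? = some [] then ['\n'] else []))
    (l : List Char) (ls' : List (List Char)) (hlen : ls'.length ≤ n)
    (hp : pvParagraphs (l :: ls') ≠ []) :
    PySem.Chars.join ['\n'] (pvAClean (l :: ls') false)
      = (if (l :: ls').head? = some [] then ['\n'] else [])
        ++ PySem.Chars.join ['\n', '\n'] (pvParagraphs (l :: ls'))
        ++ (if (l :: ls').getLast? = some [] then ['\n'] else []) := by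
  by_cases hl : l.isEmpty
  · have hlnil : l = [] := by simpa [List.isEmpty_iff] using hl
    subst hlnil
    have hpar1 : pvParagraphs (([] : List Char) :: ls')
        = pvParagraphs (ls'.dropWhile (fun l => l.isEmpty)) := by
      rw [pvParagraphs]
      simp [paragraphs_dropWhile]
    have hp'' : pvParagraphs (ls'.dropWhile (fun l => l.isEmpty)) ≠ [] := by
      rw [← hpar1]; exact hp
    cases hdw : ls'.dropWhile (fun l => l.isEmpty) with
    | nil => rw [hdw] at hp''; simp [pvParagraphs] at hp''
    | cons h2 t2 =>
      rw [hdw] at hp''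
      have hh2 : h2.isEmpty = false := dropWhile_head_false _ ls' h2 t2 hdw
      have hh2' : h2 ≠ [] := by simpa [List.isEmpty_iff] using hh2
      have hlsne : ls' ≠ [] := by
        intro e; rw [e] at hdw; simp at hdw
      have hAcl : pvAClean (([] : List Char) :: ls') false = [] :: pvAClean (h2 :: t2) false := by
        simp [pvAClean, aclean_true, hdw]
      have hlen2 : (h2 :: t2).length ≤ n := by
        have h1 := List.length_dropWhile_le (fun (l : List Char) => l.isEmpty) ls'
        rw [hdw] at h1
        omega
      have hih := ih (h2 :: t2) hlen2 hp''
      cases hX : pvAClean (h2 :: t2) false with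
      | nil => exact absurd hX (aclean_ne_nil h2 t2)
      | cons x xs =>
        rw [hAcl, hX, join_nil_cons, ← hX, hih]
        have hgl : (([] : List Char) :: ls').getLast? = (h2 :: t2).getLast? := by
          rw [getLast?_cons_ne _ _ hlsne,
            ← getLast?_dropWhile (fun l => l.isEmpty) ls' (by rw [hdw]; simp), hdw]
        rw [hpar1, hdw]
        simp [hgl, hh2']
  · have hlne : l ≠ [] := by simpa [List.isEmpty_iff] using hl
    have hsplit : ls'.takeWhile (fun x => !x.isEmpty) ++ ls'.dropWhile (fun x => !x.isEmpty) = ls' :=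
      List.takeWhile_append_dropWhile
    have hbne : ∀ x ∈ l :: ls'.takeWhile (fun x => !x.isEmpty), x ≠ [] := by
      intro x hx
      rcases List.mem_cons.mp hx with rfl | hx
      · exact hlne
      · have hq := List.mem_takeWhile_imp hx
        simpa [List.isEmpty_iff] using hq
    have hAcl : pvAClean (l :: ls') false
        = (l :: ls'.takeWhile (fun x => !x.isEmpty)) ++ pvAClean (ls'.dropWhile (fun x => !x.isEmpty)) false := by
      conv_lhs => rw [← hsplit]
      rw [show l :: (ls'.takeWhile (fun x => !x.isEmpty) ++ ls'.dropWhile (fun x => !x.isEmpty))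
            = (l :: ls'.takeWhile (fun x => !x.isEmpty)) ++ ls'.dropWhile (fun x => !x.isEmpty) by simp]
      exact aclean_block _ _ hbne
    have hpar : pvParagraphs (l :: ls')
        = PySem.Chars.join ['\n'] (l :: ls'.takeWhile (fun x => !x.isEmpty))
          :: pvParagraphs (ls'.dropWhile (fun x => !x.isEmpty)) := by
      rw [pvParagraphs]
      simp [hl]
    cases hdw : ls'.dropWhile (fun x => !x.isEmpty) with
    | nil =>
      have htw : ls'.takeWhile (fun x => !x.isEmpty) = ls' := by
        have hq := hsplit
        rw [hdw, List.append_nil] at hq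
        exact hq
      have hglne : (l :: ls').getLast? ≠ some [] := by
        intro e
        have hm := List.mem_of_getLast? e
        rw [← htw] at hm
        exact hbne [] hm rfl
      rw [hAcl, hdw, hpar, hdw]
      simp [pvAClean, pvParagraphs, hlne, hglne, PySem.Chars.join_singleton]
    | cons r0 r' =>
      have hr0 : r0 = [] := by
        have hq := dropWhile_head_false (fun x => !x.isEmpty) ls' r0 r' hdw
        simpa [List.isEmpty_iff] using hq
      subst hr0
      have he : l :: ls' = (l :: ls'.takeWhile (fun x => !x.isEmpty)) ++ ([] :: r') := by
        conv_lhs => rw [← hsplit, hdw]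
        simp
      by_cases hr'' : r'.dropWhile (fun l => l.isEmpty) = []
      · have hallb : ∀ x ∈ r', x = [] := by
          intro x hx
          have hq := List.dropWhile_eq_nil_iff.mp hr''
          simpa [List.isEmpty_iff] using hq x hx
        have hA2 : pvAClean (([] : List Char) :: r') false = [[]] := by
          simp [pvAClean, aclean_true, hr'']
        rw [hAcl, hdw, hA2,
          join_append ['\n'] _ [[]] (by simp) (by simp), PySem.Chars.join_singleton]
        have hparr : pvParagraphs (([] : List Char) :: r') = [] := by
          rw [pvParagraphs]
          simp [(paragraphs_nil_iff r').mpr hallb]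
        have hgl : (l :: ls').getLast? = some [] := by
          rw [he, List.getLast?_append_of_ne_nil _ (by simp)]
          refine getLast?_allblank _ (by simp) ?_
          intro x hx
          rcases List.mem_cons.mp hx with rfl | hx
          · rfl
          · exact hallb x hx
        rw [hpar, hdw, hparr, hgl]
        simp [PySem.Chars.join_singleton, hlne]
      · cases hdw2 : r'.dropWhile (fun l => l.isEmpty) with
        | nil => exact absurd hdw2 hr''
        | cons h2 t2 =>
          have hh2 : h2.isEmpty = false := dropWhile_head_false _ r' h2 t2 hdw2
          have hh2' : h2 ≠ [] := by simpa [List.isEmpty_iff] using hh2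
          have hrne : r' ≠ [] := by
            intro e; rw [e] at hdw2; simp at hdw2
          have hlen2 : (h2 :: t2).length ≤ n := by
            have h1 := List.length_dropWhile_le (fun (l : List Char) => l.isEmpty) r'
            rw [hdw2] at h1
            have h2l : r'.length < ls'.length := by
              have hq := congrArg List.length hsplit
              rw [hdw] at hq
              simp at hq
              omega
            omega
          have hp2 : pvParagraphs (h2 :: t2) ≠ [] := paragraphs_ne_nil h2 t2 hh2'
          have hih := ih (h2 :: t2) hlen2 hp2
          have hA2 : pvAClean (([] : List Char) :: r') false = [] :: pvAClean (h2 :: t2) false := by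
            simp [pvAClean, aclean_true, hdw2]
          cases hX : pvAClean (h2 :: t2) false with
          | nil => exact absurd hX (aclean_ne_nil h2 t2)
          | cons x xs =>
            rw [hAcl, hdw, hA2, hX,
              join_append ['\n'] _ ([] :: x :: xs) (by simp) (by simp), join_nil_cons,
              ← hX, hih]
            have hparr : pvParagraphs (([] : List Char) :: r') = pvParagraphs (h2 :: t2) := by
              rw [pvParagraphs]
              simp [← paragraphs_dropWhile r', hdw2]
            have hgl : (l :: ls').getLast? = (h2 :: t2).getLast? := by
              rw [he, List.getLast?_append_of_ne_nil _ (by simp),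
                getLast?_cons_ne _ _ hrne,
                ← getLast?_dropWhile (fun l => l.isEmpty) r' (by rw [hdw2]; simp), hdw2]
            rw [hpar, hdw, hparr]
            cases hP : pvParagraphs (h2 :: t2) with
            | nil => exact absurd hP hp2
            | cons q qs =>
              rw [PySem.Chars.join_cons_cons]
              simp [hgl, hh2', hlne]

-- the main identity: A's cleaned lines joined = B's paragraph reconstruction
theorem main_ident (n : Nat) : ∀ ls : List (List Char), ls.length ≤ n →
    pvParagraphs ls ≠ [] →
    PySem.Chars.join ['\n'] (pvAClean ls false)
      = (if ls.head? = some [] then ['\n'] else [])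
        ++ PySem.Chars.join ['\n', '\n'] (pvParagraphs ls)
        ++ (if ls.getLast? = some [] then ['\n'] else []) := by
  induction n with
  | zero =>
    intro ls hlen hp
    rw [List.length_eq_zero_iff.mp (Nat.le_zero.mp hlen)] at hp
    simp [pvParagraphs] at hp
  | succ n ih =>
    intro ls hlen hp
    cases ls with
    | nil => simp [pvParagraphs] at hp
    | cons l ls' => exact main_step n ih l ls' (by simpa using hlen) hp

-- the all-blank case: A's cleaned text is empty
theorem allblank_ident (ls : List (List Char)) (h : pvParagraphs ls = []) :
    PySem.Chars.join ['\n'] (pvAClean ls false) = [] := by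
  have hb : ∀ l ∈ ls, l = [] := (paragraphs_nil_iff ls).mp h
  cases ls with
  | nil => simp [pvAClean, PySem.Chars.join_nil]
  | cons l ls =>
    have hl : l = [] := hb l List.mem_cons_self
    subst hl
    have : pvAClean ls true = [] := aclean_true_allblank ls (fun x hx => hb x (List.mem_cons_of_mem _ hx))
    simp [pvAClean, this, PySem.Chars.join_singleton]

-- ===== VERDICT =====
theorem clean_subtitle_text_spec : Claim_equal_clean_subtitle_text := by
  intro text _
  unfold Spec_clean_subtitle_text clean_subtitle_text clean_subtitle_text_alt
  have hnorm : ∀ l ∈ (PySem.Chars.splitOn text.toList ['\n']).map PySem.Chars.rstrip,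
      (PySem.Chars.strip l).length = 0 → l = [] := by
    intro l hl hlen
    rcases List.mem_map.mp hl with ⟨x, _, rfl⟩
    exact rstripped_nil_of_strip_len_zero x hlen
  have hfold := foldA_eq _ hnorm [] false
  simp only []
  rw [hfold, List.nil_append]
  by_cases hP : pvParagraphs ((PySem.Chars.splitOn text.toList ['\n']).map PySem.Chars.rstrip) = []
  · rw [allblank_ident _ hP]
    simp [hP]
  · rw [main_ident _ _ le_rfl hP]
    simp only [if_neg hP]
    split_ifs <;> simp
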